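-- pv_equiv track=rewrite | github.com/mila-iqia/babyai | levels/instr_gen.py | ancestor_concepts
-- ===== SOURCE A (Python) =====
-- CONCEPTS = {
--     'action': {'pick', 'goto', 'drop', 'open'},
--     'object': {'door', 'wall', 'ball', 'key', 'box'},
--     'attr': {'color', 'loc', 'state'},
--     'loc': {'loc_abs', 'loc_rel'},
--     'color': {'red', 'blue', 'green'},
--     'loc_abs': {'east', 'west', 'north', 'south'},
--     'loc_rel': {'left', 'right'},
--     'state': {'locked'}}
--
-- def check_valid_concept(name):
--     if name in CONCEPTS:
--         return True
--     for c in CONCEPTS: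
--         if name in CONCEPTS[c]:
--             return True
--     raise ValueError("Incorrect concept name: {}".format(name))
--
-- def parent_concepts(name):
--     check_valid_concept(name)
--     parents = set()
--     for k in CONCEPTS:
--         if name in CONCEPTS[k]:
--             parents = parents|{k}
--     return parents
--
-- def ancestor_concepts(name):
--     parent_c = parent_concepts(name)
--     if parent_c == set():
--         return set()
--     else:
--         ancestor_c = set()
--         for pa in parent_c:
--             ancestor_c |= ancestor_concepts(pa)
--         return parent_concepts(name)| ancestor_c
-- ===== SOURCE B (Python) =====
-- CONCEPTS = {
--     'action': {'pick', 'goto', 'drop', 'open'},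
--     'object': {'door', 'wall', 'ball', 'key', 'box'},
--     'attr': {'color', 'loc', 'state'},
--     'loc': {'loc_abs', 'loc_rel'},
--     'color': {'red', 'blue', 'green'},
--     'loc_abs': {'east', 'west', 'north', 'south'},
--     'loc_rel': {'left', 'right'},
--     'state': {'locked'}}
--
-- # Inverted index: child concept -> list of its parent concepts, built once.
-- _PARENTS = {}
-- for _k in CONCEPTS:
--     for _v in CONCEPTS[_k]:
--         _PARENTS.setdefault(_v, []).append(_k)
--
--
-- def ancestor_concepts(name):
--     if name not in CONCEPTS and name not in _PARENTS:
--         raise ValueError("Incorrect concept name: {}".format(name))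
--     result = set()
--     work = list(_PARENTS.get(name, []))
--     while work:
--         node = work.pop()
--         if node not in result:
--             result.add(node)
--             work.extend(_PARENTS.get(node, []))
--     return result
-- ===== Notes on version B (the rewrite author's own statement) =====
-- stated objective: alternative
-- what changed: Replaces A's recursion (each level re-scanning the whole CONCEPTS dict via parent_concepts) with a precomputed child-to-parents inverted index and an iterative worklist loop over it.
import Mathlib
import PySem

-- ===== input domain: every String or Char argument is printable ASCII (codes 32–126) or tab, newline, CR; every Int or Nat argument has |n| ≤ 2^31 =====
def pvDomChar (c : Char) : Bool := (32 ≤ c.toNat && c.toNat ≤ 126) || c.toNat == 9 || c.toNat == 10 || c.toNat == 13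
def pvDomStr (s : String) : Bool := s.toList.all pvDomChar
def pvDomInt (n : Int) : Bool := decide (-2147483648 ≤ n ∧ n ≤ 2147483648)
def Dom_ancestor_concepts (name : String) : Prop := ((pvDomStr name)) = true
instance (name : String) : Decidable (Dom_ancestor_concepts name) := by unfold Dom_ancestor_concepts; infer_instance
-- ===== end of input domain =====

-- B replaces A's recursion-with-repeated-full-dict-scans by a precomputed child->parents
-- inverted index and an iterative worklist loop (objective: alternative, not measured faster).


-- ===== PORT A =====
-- the module-level CONCEPTS dict (set literals kept in source order)
def pyCONCEPTS : PySem.Dict String (PySem.Set String) :=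
  PySem.Dict.ofList
  [("action", PySem.Set.ofList ["pick", "goto", "drop", "open"]),
   ("object", PySem.Set.ofList ["door", "wall", "ball", "key", "box"]),
   ("attr", PySem.Set.ofList ["color", "loc", "state"]),
   ("loc", PySem.Set.ofList ["loc_abs", "loc_rel"]),
   ("color", PySem.Set.ofList ["red", "blue", "green"]),
   ("loc_abs", PySem.Set.ofList ["east", "west", "north", "south"]),
   ("loc_rel", PySem.Set.ofList ["left", "right"]),
   ("state", PySem.Set.ofList ["locked"])]

-- parent_concepts: check_valid_concept either returns True or raises ValueError; the
-- raising inputs are excluded by Pre_, so only the loop over CONCEPTS is ported.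
def parent_concepts (name : String) : PySem.Set String :=
  pyCONCEPTS.items.foldl
    (fun parents kv =>
      if PySem.Set.contains kv.2 name then PySem.Set.union parents [kv.1] else parents)
    PySem.Set.empty

-- ancestor_concepts, with a fuel guard for termination only: the taxonomy's ancestor
-- chains have length ≤ 4, so fuel 8 is never exhausted on a valid name.
def ancestor_concepts_fuel : Nat → String → PySem.Set String
  | 0, _ => PySem.Set.empty
  | Nat.succ f, name =>
    let parent_c := parent_concepts name
    if PySem.Set.equal parent_c PySem.Set.empty then PySem.Set.empty
    else
      let ancestor_c := parent_c.foldl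
        (fun acc pa => PySem.Set.union acc (ancestor_concepts_fuel f pa)) PySem.Set.empty
      PySem.Set.union (parent_concepts name) ancestor_c

def ancestor_concepts (name : String) : List String := ancestor_concepts_fuel 8 name

-- ===== PORT B =====
-- _PARENTS: inverted index child -> list of parents, built once from CONCEPTS (Source B's module loop)
def altPARENTS : PySem.Dict String (List String) :=
  pyCONCEPTS.items.foldl
    (fun d kv => kv.2.foldl (fun d v => d.insert v ((d.getD v []) ++ [kv.1])) d)
    PySem.Dict.empty

-- the while loop: pop from the end of work, accumulate result, push parents of new nodes.
-- Fuel guard for termination only (each concept enters work at most a handful of times;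
-- 64 is never exhausted on this fixed taxonomy).
def alt_loop : Nat → PySem.Set String → List String → PySem.Set String
  | 0, result, _ => result
  | Nat.succ f, result, work =>
    if work.isEmpty then result
    else
      let node := work.getLast!
      let work' := work.dropLast
      if PySem.Set.contains result node then alt_loop f result work'
      else alt_loop f (PySem.Set.add result node) (work' ++ (altPARENTS.getD node []))

def ancestor_concepts_alt (name : String) : List String :=
  if ¬ (PySem.Dict.contains pyCONCEPTS name || PySem.Dict.contains altPARENTS name) then
    []  -- Source B raises ValueError here; such inputs are outside Pre_
  else
    alt_loop 64 PySem.Set.empty (altPARENTS.getD name [])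

-- ===== PRECONDITION & SPEC =====
-- Pre_ excludes exactly the invalid concept names, on which both A and B raise ValueError.
def Pre_ancestor_concepts (name : String) : Prop :=
  name ∈ ["action", "object", "attr", "loc", "color", "loc_abs", "loc_rel", "state",
          "pick", "goto", "drop", "open", "door", "wall", "ball", "key", "box",
          "red", "blue", "green", "east", "west", "north", "south", "left", "right", "locked"]
instance (name : String) : Decidable (Pre_ancestor_concepts name) := by
  unfold Pre_ancestor_concepts; infer_instance

def pvWitness_ancestor_concepts : String := "east"

def Spec_ancestor_concepts (name : String) (out : List String) : Prop := out = ancestor_concepts_alt name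
instance (name : String) (out : List String) : Decidable (Spec_ancestor_concepts name out) := by unfold Spec_ancestor_concepts; infer_instance

-- ===== CLAIM (what is proved, stated in full; the proofs are below) =====
def Claim_equal_ancestor_concepts : Prop := ∀ (name : String), Dom_ancestor_concepts name → Pre_ancestor_concepts name → Spec_ancestor_concepts name (ancestor_concepts name)

-- ===== LEMMAS AND PROOFS =====

-- ===== VERDICT (by name: the statement is the Claim_ definition above) =====
theorem ancestor_concepts_spec : Claim_equal_ancestor_concepts := by
  intro name _ hpre
  unfold Pre_ancestor_concepts at hpre
  unfold Spec_ancestor_concepts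
  simp only [List.mem_cons, List.not_mem_nil, or_false] at hpre
  rcases hpre with h|h|h|h|h|h|h|h|h|h|h|h|h|h|h|h|h|h|h|h|h|h|h|h|h|h|h <;> subst h <;> decide
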